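-- pv_equiv track=rewrite | github.com/AIME-JF/trainingplatform | backend/app/services/ai.py | _normalize_knowledge_points
-- ===== SOURCE A (Python) =====
-- from typing import Iterable, List, Optional
--
-- def _normalize_knowledge_points(knowledge_points: Iterable[str]) -> List[str]:
--     normalized: List[str] = []
--     seen = set()
--     for raw_item in knowledge_points or []:
--         item = str(raw_item or "").strip()
--         if not item or item in seen:
--             continue
--         seen.add(item)
--         normalized.append(item[:100])
--     return normalized
-- ===== SOURCE B (Python) =====
-- def _normalize_knowledge_points(knowledge_points):
--     # Nub by tail-filtering: no seen-set; take the first pending item and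
--     # delete every later occurrence of it from the pending list.
--     pending = [str(x or "").strip() for x in (knowledge_points or [])]
--     result = []
--     while pending:
--         head, rest = pending[0], pending[1:]
--         if head:
--             result.append(head[:100])
--             pending = [s for s in rest if s != head]
--         else:
--             pending = rest
--     return result
-- ===== Notes on version B (the rewrite author's own statement) =====
-- stated objective: alternative
-- what changed: Removes the seen-set entirely: B dedups by the nub-by-filtering algorithm (take the first pending stripped item, emit its 100-char truncation, and delete all later occurrences of it from the pending list), a quadratic rewrite-the-worklist loop instead of A's single pass with a membership set.
import Mathlib
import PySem

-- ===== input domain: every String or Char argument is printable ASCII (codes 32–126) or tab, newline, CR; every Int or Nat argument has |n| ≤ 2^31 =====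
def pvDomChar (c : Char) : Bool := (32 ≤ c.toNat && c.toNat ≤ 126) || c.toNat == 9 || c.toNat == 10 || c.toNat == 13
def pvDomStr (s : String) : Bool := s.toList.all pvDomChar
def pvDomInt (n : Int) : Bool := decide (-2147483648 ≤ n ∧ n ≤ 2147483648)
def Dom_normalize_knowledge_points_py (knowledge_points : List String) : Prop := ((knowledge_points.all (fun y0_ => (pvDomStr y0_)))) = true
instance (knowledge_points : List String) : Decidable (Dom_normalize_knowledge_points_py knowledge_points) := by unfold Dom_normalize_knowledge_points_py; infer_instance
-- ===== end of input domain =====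

-- B drops A's seen-set: it dedups by nub-by-filtering (emit the first pending stripped item, delete its later occurrences from the worklist); alternative algorithm, not claimed faster.
-- shared helpers: str(x or "").strip() and s[:100]
def pvNorm (x : String) : String := PySem.Str.strip (if x == "" then "" else x)
def pvTrunc (s : String) : String := PySem.Str.slice s none (some 100)

-- ===== PORT A =====
def pvStepA (st : List String × PySem.Set String) (raw_item : String) :
    List String × PySem.Set String :=
  let item := pvNorm raw_item
  if item == "" || PySem.Set.contains st.2 item then st
  else (st.1 ++ [pvTrunc item], PySem.Set.add st.2 item)

def normalize_knowledge_points_py (knowledge_points : List String) : List String :=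
  (knowledge_points.foldl pvStepA ([], PySem.Set.empty)).1

-- ===== PORT B =====
-- B's while loop over (result, pending) as the obvious recursion on the shrinking pending list
def pvGo (result : List String) : List String → List String
  | [] => result
  | head :: rest =>
      if head == "" then pvGo result rest
      else pvGo (result ++ [pvTrunc head]) (rest.filter (fun s => !(s == head)))
termination_by l => l.length
decreasing_by
  · simp
  · have h := List.length_filter_le (fun x : {x // x ∈ rest} => !(x.1 == head)) rest.attach
    simp at h ⊢
    omega

def normalize_knowledge_points_py_alt (knowledge_points : List String) : List String :=
  pvGo [] (knowledge_points.map pvNorm)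

-- ===== PRECONDITION & SPEC =====
def Spec_normalize_knowledge_points_py (knowledge_points : List String) (out : List String) : Prop := out = normalize_knowledge_points_py_alt knowledge_points
instance (knowledge_points : List String) (out : List String) : Decidable (Spec_normalize_knowledge_points_py knowledge_points out) := by unfold Spec_normalize_knowledge_points_py; infer_instance

-- ===== CLAIM =====
def Claim_equal_normalize_knowledge_points_py : Prop := ∀ (knowledge_points : List String), Dom_normalize_knowledge_points_py knowledge_points → Spec_normalize_knowledge_points_py knowledge_points (normalize_knowledge_points_py knowledge_points)

-- ===== LEMMAS AND PROOFS =====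

-- first-occurrence dedup by tail-filtering (proof-side characterisation shared by both directions)
def pvNub : List String → List String
  | [] => []
  | h :: t => h :: pvNub (t.filter (fun s => !(s == h)))
termination_by l => l.length
decreasing_by
  have hle := List.length_filter_le (fun x : {x // x ∈ t} => !(x.1 == h)) t.attach
  simp at hle ⊢
  omega

-- equation lemmas (pvGo / pvNub are well-founded recursions, simp cannot unfold them)
theorem pvGo_nil (r : List String) : pvGo r [] = r := by rw [pvGo]
theorem pvGo_cons (r : List String) (h : String) (t : List String) :
    pvGo r (h :: t) = if h == "" then pvGo r t
      else pvGo (r ++ [pvTrunc h]) (t.filter (fun s => !(s == h))) := by rw [pvGo]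
theorem pvNub_nil : pvNub [] = [] := by rw [pvNub]
theorem pvNub_cons (h : String) (t : List String) :
    pvNub (h :: t) = h :: pvNub (t.filter (fun s => !(s == h))) := by rw [pvNub]

-- A's loop from state (u.map pvTrunc, u) folds Set.add over the stripped nonempty items
theorem pvLoopInv (xs : List String) (u : PySem.Set String) :
    xs.foldl pvStepA (u.map pvTrunc, u)
    = ((((xs.map pvNorm).filter (fun s => !(s == ""))).foldl PySem.Set.add u).map pvTrunc,
       ((xs.map pvNorm).filter (fun s => !(s == ""))).foldl PySem.Set.add u) := by
  induction xs generalizing u with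
  | nil => rfl
  | cons x xs ih =>
    simp only [List.foldl_cons, List.map_cons, List.filter_cons]
    by_cases h0 : pvNorm x = ""
    · simpa [pvStepA, h0] using ih u
    · by_cases hc : pvNorm x ∈ u
      · have hadd : PySem.Set.add u (pvNorm x) = u := by simp [PySem.Set.add, hc]
        simpa [pvStepA, h0, hc, hadd] using ih u
      · have hadd : PySem.Set.add u (pvNorm x) = u ++ [pvNorm x] := by
          simp [PySem.Set.add, hc]
        have hst : pvStepA (u.map pvTrunc, u) x
            = ((u ++ [pvNorm x]).map pvTrunc, u ++ [pvNorm x]) := by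
          simp [pvStepA, h0, hc]
        rw [hst]
        simpa [hadd, h0] using ih (u ++ [pvNorm x])

-- folding Set.add over ys from u appends the nub of the items not already in u
theorem pvFoldNub (ys : List String) (u : List String) :
    ys.foldl PySem.Set.add u = u ++ pvNub (ys.filter (fun s => !(decide (s ∈ u)))) := by
  induction ys generalizing u with
  | nil => simp [pvNub_nil]
  | cons h t ih =>
    simp only [List.foldl_cons, List.filter_cons]
    by_cases hc : h ∈ u
    · have hadd : PySem.Set.add u h = u := by simp [PySem.Set.add, hc]
      simpa [hadd, hc] using ih u
    · have hadd : PySem.Set.add u h = u ++ [h] := by simp [PySem.Set.add, hc]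
      rw [hadd, ih (u ++ [h])]
      have hfil : t.filter (fun s => !(decide (s ∈ u ++ [h])))
          = (t.filter (fun s => !(decide (s ∈ u)))).filter (fun s => !(s == h)) := by
        rw [List.filter_filter]
        apply List.filter_congr
        intro a _
        by_cases h1 : a = h <;> by_cases h2 : a ∈ u <;> simp [h1, h2]
      rw [hfil]
      simp only [hc, decide_false, Bool.not_false, if_pos]
      rw [pvNub_cons]
      simp

-- B's worklist loop computes result ++ truncated nub of the nonempty pending items
theorem pvGoChar (ys : List String) (result : List String) :
    pvGo result ys = result ++ (pvNub (ys.filter (fun s => !(s == "")))).map pvTrunc := by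
  induction hn : ys.length using Nat.strong_induction_on generalizing ys result with
  | _ n ih =>
    match ys with
    | [] => simp [pvGo_nil, pvNub_nil]
    | head :: rest =>
      by_cases h0 : head = ""
      · have := ih rest.length (by simp [← hn]) rest result rfl
        simpa [pvGo_cons, h0] using this
      · have hlen : (rest.filter (fun s => !(s == head))).length < n := by
          have := List.length_filter_le (fun s => !(s == head)) rest
          simp [← hn]; omega
        have := ih _ hlen (rest.filter (fun s => !(s == head))) (result ++ [pvTrunc head]) rfl
        rw [pvGo_cons, if_neg (by simpa using h0), this]
        have hfil : (rest.filter (fun s => !(s == head))).filter (fun s => !(s == ""))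
            = (rest.filter (fun s => !(s == ""))).filter (fun s => !(s == head)) := by
          rw [List.filter_filter, List.filter_filter]
          apply List.filter_congr; intro a _; simp [Bool.and_comm]
        rw [hfil]
        simp only [List.filter_cons]
        rw [if_pos (by simp [h0] : (!(head == "")) = true), pvNub_cons]
        simp


-- ===== VERDICT =====
theorem normalize_knowledge_points_py_spec : Claim_equal_normalize_knowledge_points_py := by
  intro kps _
  unfold Spec_normalize_knowledge_points_py normalize_knowledge_points_py normalize_knowledge_points_py_alt
  have h := pvLoopInv kps []
  simp only [List.map_nil] at h
  rw [show (PySem.Set.empty : PySem.Set String) = [] from rfl, h, pvGoChar]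
  have := pvFoldNub ((kps.map pvNorm).filter (fun s => !(s == ""))) []
  simp only [List.mem_nil_iff, decide_false, Bool.not_false, List.filter_true,
    List.nil_append] at this ⊢
  rw [this]
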